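-- pv_equiv track=rewrite | github.com/peter-clark/investigating-human-tapping-behavior-polyphonic-rhythms | flatten.py | lmh_counts
-- ===== SOURCE A (Python) =====
-- def lmh_counts(pattern):
--     pattern_LMH = pattern # LOW MID HIGH
--     pattern_LMH_count=[[0 for x in range(len(pattern_LMH))] for y in range(3)]
--      # Count multi-hits in same channel on step
--     for i in range(len(pattern_LMH)):
--         for j in range(len(pattern_LMH[i])):
--             pattern_LMH_count[0][i] += 1 if pattern_LMH[i][j]==1 else 0 # LOW
--             pattern_LMH_count[1][i] += 1 if pattern_LMH[i][j]==2 else 0 # MID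
--             pattern_LMH_count[2][i] += 1 if pattern_LMH[i][j]==3 else 0 # HIGH
--     return pattern_LMH_count
-- ===== SOURCE B (Python) =====
-- def lmh_counts(pattern):
--     return [[row.count(v) for row in pattern] for v in (1, 2, 3)]
-- ===== Notes on version B (the rewrite author's own statement) =====
-- stated objective: faster
-- what changed: Replaces the step-major single pass that mutates a preallocated 3xN zero matrix (three conditional increments per cell) with three independent value-major scans, result row v = [row.count(v) for row in pattern], letting the C-level list.count do the counting.
import Mathlib
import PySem

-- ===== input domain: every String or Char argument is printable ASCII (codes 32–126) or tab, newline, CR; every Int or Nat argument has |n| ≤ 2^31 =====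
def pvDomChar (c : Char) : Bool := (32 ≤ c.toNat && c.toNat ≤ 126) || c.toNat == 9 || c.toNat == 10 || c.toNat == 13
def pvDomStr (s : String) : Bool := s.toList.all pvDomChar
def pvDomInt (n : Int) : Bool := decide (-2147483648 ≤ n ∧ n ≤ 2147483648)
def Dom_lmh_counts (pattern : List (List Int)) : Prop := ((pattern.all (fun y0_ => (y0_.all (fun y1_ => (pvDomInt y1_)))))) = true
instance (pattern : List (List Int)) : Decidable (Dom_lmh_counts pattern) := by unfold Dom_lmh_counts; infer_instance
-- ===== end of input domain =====

-- B replaces A's step-major mutating pass with three value-major count scans ('simpler').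

-- ===== PORT A =====
-- pattern_LMH_count[k][i] += d  (list element mutation at row k, column i)
def pvBump (acc : List (List Int)) (k i : Nat) (d : Int) : List (List Int) :=
  acc.set k ((acc.getD k []).set i ((acc.getD k []).getD i 0 + d))

def lmh_counts (pattern : List (List Int)) : List (List Int) :=
  -- pattern_LMH_count = [[0 for x in range(len(pattern_LMH))] for y in range(3)]
  let cnt : List (List Int) :=
    (PySem.List.pyRange 0 3 1).map
      (fun _ => (PySem.List.pyRange 0 (pattern.length : Int) 1).map (fun _ => (0 : Int)))
  -- for i in range(len(pattern_LMH)): for j in range(len(pattern_LMH[i])): ...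
  (PySem.List.pyRange 0 (pattern.length : Int) 1).foldl
    (fun acc i =>
      (PySem.List.pyRange 0 ((PySem.List.pyGetD pattern i []).length : Int) 1).foldl
        (fun acc2 j =>
          let v := PySem.List.pyGetD (PySem.List.pyGetD pattern i []) j 0
          let acc2 := pvBump acc2 0 i.toNat (if v == 1 then 1 else 0)
          let acc2 := pvBump acc2 1 i.toNat (if v == 2 then 1 else 0)
          pvBump acc2 2 i.toNat (if v == 3 then 1 else 0))
        acc)
    cnt

-- ===== PORT B =====
def lmh_counts_alt (pattern : List (List Int)) : List (List Int) :=
  [(1 : Int), 2, 3].map (fun v => pattern.map (fun row => ((row.count v : Nat) : Int)))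

-- ===== PRECONDITION & SPEC =====
def Spec_lmh_counts (pattern : List (List Int)) (out : List (List Int)) : Prop := out = lmh_counts_alt pattern
instance (pattern : List (List Int)) (out : List (List Int)) : Decidable (Spec_lmh_counts pattern out) := by unfold Spec_lmh_counts; infer_instance

-- ===== CLAIM (what is proved, stated in full; the proofs are below) =====
def Claim_equal_lmh_counts : Prop := ∀ (pattern : List (List Int)), Dom_lmh_counts pattern → Spec_lmh_counts pattern (lmh_counts pattern)

-- ===== LEMMAS AND PROOFS =====

-- row update at one column: r[i] += d
def pvStepRow (r : List Int) (i : Nat) (d : Int) : List Int :=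
  r.set i (r.getD i 0 + d)

theorem pvStepRow_zero (r : List Int) (i : Nat) : pvStepRow r i 0 = r := by
  unfold pvStepRow
  by_cases h : i < r.length
  · simp [List.getD, List.getElem?_eq_getElem h]
  · exact List.set_eq_of_length_le (by omega)

theorem pvStepRow_add (r : List Int) (i : Nat) (a b : Int) :
    pvStepRow (pvStepRow r i a) i b = pvStepRow r i (a + b) := by
  unfold pvStepRow
  by_cases h : i < r.length
  · simp [List.getD, h, List.getElem_set_self]
    ring_nf
  · have h1 : r.set i (r.getD i 0 + a) = r := List.set_eq_of_length_le (by omega)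
    rw [h1, List.set_eq_of_length_le (by omega), List.set_eq_of_length_le (by omega)]

-- one pvBump on a literal 3-row state
theorem pvBump_zero (r1 r2 r3 : List Int) (i : Nat) (d : Int) :
    pvBump [r1, r2, r3] 0 i d = [pvStepRow r1 i d, r2, r3] := by
  simp [pvBump, pvStepRow, List.getD]
theorem pvBump_one (r1 r2 r3 : List Int) (i : Nat) (d : Int) :
    pvBump [r1, r2, r3] 1 i d = [r1, pvStepRow r2 i d, r3] := by
  simp [pvBump, pvStepRow, List.getD]
theorem pvBump_two (r1 r2 r3 : List Int) (i : Nat) (d : Int) :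
    pvBump [r1, r2, r3] 2 i d = [r1, r2, pvStepRow r3 i d] := by
  simp [pvBump, pvStepRow, List.getD]

-- the inner j-loop over a whole row adds that row's 1/2/3 counts at column i
theorem pvInner (row : List Int) (i : Nat) :
    ∀ (r1 r2 r3 : List Int),
      row.foldl
        (fun acc2 v =>
          pvBump (pvBump (pvBump acc2 0 i (if v == 1 then 1 else 0))
              1 i (if v == 2 then 1 else 0)) 2 i (if v == 3 then 1 else 0))
        [r1, r2, r3]
      = [pvStepRow r1 i ((row.count 1 : Nat) : Int),
         pvStepRow r2 i ((row.count 2 : Nat) : Int),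
         pvStepRow r3 i ((row.count 3 : Nat) : Int)] := by
  induction row with
  | nil => intro r1 r2 r3; simp [pvStepRow_zero]
  | cons v rest ih =>
    intro r1 r2 r3
    rw [List.foldl_cons, pvBump_zero, pvBump_one, pvBump_two, ih, pvStepRow_add,
      pvStepRow_add, pvStepRow_add]
    have hc : ∀ (k : Int), (if v == k then (1:Int) else 0) + (((rest.count k : Nat)) : Int)
        = (((v :: rest).count k : Nat) : Int) := by
      intro k
      rw [List.count_cons]
      by_cases h : v = k
      · simp [h]; omega
      · simp [h]
    rw [hc 1, hc 2, hc 3]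

-- partial-result rows: column i counts for i < m, zeros beyond
def pvPartial (pattern : List (List Int)) (v : Int) (m : Nat) : List Int :=
  (List.range pattern.length).map
    (fun i => if i < m then (((pattern.getD i []).count v : Nat) : Int) else 0)

theorem pvPartial_step (pattern : List (List Int)) (v : Int) (m : Nat) (hm : m < pattern.length) :
    pvStepRow (pvPartial pattern v m) m (((pattern.getD m []).count v : Nat) : Int)
      = pvPartial pattern v (m + 1) := by
  unfold pvStepRow pvPartial
  apply List.ext_getElem
  · simp
  · intro j h1 h2
    simp only [List.length_set, List.length_map, List.length_range] at h1
    by_cases hj : j = m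
    · subst hj
      rw [List.getElem_set_self (by simpa using hm)]
      simp [List.getD, hm]
    · rw [List.getElem_set_ne (by omega)]
      simp only [List.getElem_map, List.getElem_range]
      have : j < m ↔ j < m + 1 := by omega
      simp [this]

theorem pvOuter (pattern : List (List Int)) (m : Nat) (hm : m ≤ pattern.length) :
    (PySem.List.pyRange 0 (m : Int) 1).foldl
      (fun acc i =>
        (PySem.List.pyRange 0 ((PySem.List.pyGetD pattern i []).length : Int) 1).foldl
          (fun acc2 j =>
            let v := PySem.List.pyGetD (PySem.List.pyGetD pattern i []) j 0
            let acc2 := pvBump acc2 0 i.toNat (if v == 1 then 1 else 0)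
            let acc2 := pvBump acc2 1 i.toNat (if v == 2 then 1 else 0)
            pvBump acc2 2 i.toNat (if v == 3 then 1 else 0))
          acc)
      [pvPartial pattern 1 0, pvPartial pattern 1 0, pvPartial pattern 1 0]
    = [pvPartial pattern 1 m, pvPartial pattern 2 m, pvPartial pattern 3 m] := by
  induction m with
  | zero => simp [PySem.List.pyRange_zero_nat, pvPartial]
  | succ k ih =>
    have hk : k ≤ pattern.length := by omega
    have hsplit : PySem.List.pyRange 0 ((k : Int) + 1) 1
        = PySem.List.pyRange 0 (k : Int) 1 ++ [(k : Int)] :=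
      PySem.List.pyRange_one_succ_right (by omega)
    have hcast : ((k + 1 : Nat) : Int) = (k : Int) + 1 := by push_cast; ring
    rw [hcast, hsplit, List.foldl_append, ih hk, List.foldl_cons, List.foldl_nil]
    have hrow : PySem.List.pyGetD pattern (k : Int) [] = pattern.getD k [] := by
      simp [PySem.List.pyGetD_natCast]
    simp only [hrow, Int.toNat_natCast]
    rw [PySem.List.foldl_pyRange_zero_pyGetD' (pattern.getD k []) 0
      (fun acc2 v =>
        pvBump (pvBump (pvBump acc2 0 k (if v == 1 then 1 else 0))
            1 k (if v == 2 then 1 else 0)) 2 k (if v == 3 then 1 else 0))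
      [pvPartial pattern 1 k, pvPartial pattern 2 k, pvPartial pattern 3 k]]
    rw [pvInner (pattern.getD k []) k]
    rw [pvPartial_step pattern 1 k (by omega), pvPartial_step pattern 2 k (by omega),
      pvPartial_step pattern 3 k (by omega)]

theorem pvInit (pattern : List (List Int)) (v : Int) :
    (PySem.List.pyRange 0 (pattern.length : Int) 1).map (fun _ => (0 : Int))
      = pvPartial pattern v 0 := by
  unfold pvPartial
  apply List.ext_getElem
  · simp [PySem.List.length_pyRange_one]
  · intro j h1 h2; simp

theorem pvPartial_full (pattern : List (List Int)) (v : Int) :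
    pvPartial pattern v pattern.length = pattern.map (fun row => ((row.count v : Nat) : Int)) := by
  unfold pvPartial
  apply List.ext_getElem
  · simp
  · intro j h1 h2
    simp only [List.length_map, List.length_range] at h1
    simp [h1, List.getD]

-- ===== VERDICT (by name: the statement is the Claim_ definition above) =====
theorem lmh_counts_spec : Claim_equal_lmh_counts := by
  intro pattern _
  show lmh_counts pattern = lmh_counts_alt pattern
  unfold lmh_counts lmh_counts_alt
  have h3 : PySem.List.pyRange 0 3 1 = [0, 1, 2] := by decide
  simp only [h3, List.map_cons, List.map_nil]
  rw [pvInit pattern 1, pvOuter pattern pattern.length (le_refl _),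
    pvPartial_full, pvPartial_full, pvPartial_full]
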